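-- pv_equiv track=rewrite | github.com/GitMonsters/octotetrahedral-agi | arc-puzzle-catalog/re-arc/solves/0bb97247/solver.py | transform
-- ===== SOURCE A (Python) =====
-- from collections import Counter
--
-- def transform(input_grid):
--     R, C = len(input_grid), len(input_grid[0])
--     bg = Counter(v for r in input_grid for v in r).most_common(1)[0][0]
--
--     # Find connected components of color 9
--     cells9 = set()
--     for r in range(R):
--         for c in range(C):
--             if input_grid[r][c] == 9:
--                 cells9.add((r, c))
--
--     visited = set()
--     num_components = 0
--     for r, c in cells9:
--         if (r, c) not in visited:
--             num_components += 1
--             queue = [(r, c)]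
--             visited.add((r, c))
--             while queue:
--                 cr, cc = queue.pop(0)
--                 for dr, dc in [(-1,0),(1,0),(0,-1),(0,1)]:
--                     nr, nc = cr+dr, cc+dc
--                     if (nr, nc) in cells9 and (nr, nc) not in visited:
--                         visited.add((nr, nc))
--                         queue.append((nr, nc))
--
--     # Fill order for 9s in the 3x3 output (checkerboard positions first)
--     fill_order = [(2,0), (2,2), (1,1), (0,0), (0,2),
--                   (2,1), (1,0), (1,2), (0,1)]
--
--     out = [[bg]*3 for _ in range(3)]
--     for idx in range(min(num_components, 9)):
--         r, c = fill_order[idx]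
--         out[r][c] = 9
--
--     return out
-- ===== SOURCE B (Python) =====
-- from collections import Counter
--
-- def transform(input_grid):
--     R, C = len(input_grid), len(input_grid[0])
--     bg = Counter(v for r in input_grid for v in r).most_common(1)[0][0]
--
--     # Color-9 cells in row-major order
--     cells9 = [(r, c) for r in range(R) for c in range(C) if input_grid[r][c] == 9]
--
--     # Union-find over the 9-cells: union each cell with its right and down
--     # neighbours; 4-connectivity is fully covered by these two directions.
--     parent = {cell: cell for cell in cells9}
--
--     def find(x):
--         while parent[x] != x:
--             x = parent[x]
--         return x
--
--     for (r, c) in cells9: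
--         for nb in ((r, c + 1), (r + 1, c)):
--             if nb in parent:
--                 ra, rb = find((r, c)), find(nb)
--                 if ra != rb:
--                     parent[ra] = rb
--
--     num_components = len({find(cell) for cell in cells9})
--
--     fill_order = [(2,0), (2,2), (1,1), (0,0), (0,2),
--                   (2,1), (1,0), (1,2), (0,1)]
--
--     out = [[bg]*3 for _ in range(3)]
--     for idx in range(min(num_components, 9)):
--         r, c = fill_order[idx]
--         out[r][c] = 9
--
--     return out
-- ===== Notes on version B (the rewrite author's own statement) =====
-- stated objective: alternative
-- what changed: The BFS flood-fill component count (visited set + FIFO queue per start cell) is replaced by union-find: each color-9 cell is unioned with its right and down neighbours and the components are counted as the distinct find-roots.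
import Mathlib
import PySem

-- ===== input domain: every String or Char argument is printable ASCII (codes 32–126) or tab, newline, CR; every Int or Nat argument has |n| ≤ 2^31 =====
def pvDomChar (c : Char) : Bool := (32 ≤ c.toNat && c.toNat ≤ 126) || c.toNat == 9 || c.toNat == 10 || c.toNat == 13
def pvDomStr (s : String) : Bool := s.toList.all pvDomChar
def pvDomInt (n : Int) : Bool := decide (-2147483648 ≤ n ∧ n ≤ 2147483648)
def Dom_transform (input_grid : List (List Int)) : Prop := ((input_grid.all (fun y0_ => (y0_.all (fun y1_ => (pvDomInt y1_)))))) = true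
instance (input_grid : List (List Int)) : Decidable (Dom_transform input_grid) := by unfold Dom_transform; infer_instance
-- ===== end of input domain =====

-- B replaces A's per-start BFS flood fill (FIFO queue + visited set) by union-find over the
-- color-9 cells (union right/down neighbours, count distinct find-roots); same exact output.

-- ===== PORT A =====

-- bg = Counter(v for r in input_grid for v in r).most_common(1)[0][0]
-- (most_common = stable sort of the counter items by count, descending; [0] under Pre_).
-- Both Pythons contain this identical expression, so both ports share this helper.
def pvBg (input_grid : List (List Int)) : Int :=
  (PySem.List.pyGetD
    (PySem.List.sorted (PySem.Dict.counter (input_grid.flatMap (fun r => r))).items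
      (fun kv => kv.2) true) 0 ((0 : Int), (0 : Int))).1

def pvFillOrder : List (Int × Int) :=
  [(2,0), (2,2), (1,1), (0,0), (0,2), (2,1), (1,0), (1,2), (0,1)]

-- out = [[bg]*3 for _ in range(3)]; for idx in range(min(n, 9)): out[r][c] = 9
-- (identical code in both Pythons, shared helper)
def pvFill (bg : Int) (num_components : Int) : List (List Int) :=
  (PySem.List.pyRange 0 (min num_components 9) 1).foldl
    (fun out idx =>
      let rc := PySem.List.pyGetD pvFillOrder idx (0, 0)
      PySem.List.pySetD out rc.1 (PySem.List.pySetD (PySem.List.pyGetD out rc.1 []) rc.2 9))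
    [[bg, bg, bg], [bg, bg, bg], [bg, bg, bg]]

def pvDirs : List (Int × Int) := [(-1,0), (1,0), (0,-1), (0,1)]

-- the body of A's inner 'for dr, dc in [...]' loop, scanning the 4 neighbours of q
def pvBfsStep (cells9 : List (Int × Int)) (q : Int × Int)
    (visited qs : List (Int × Int)) : List (Int × Int) × List (Int × Int) :=
  pvDirs.foldl
    (fun vq d =>
      let nb := (q.1 + d.1, q.2 + d.2)
      if nb ∈ cells9 ∧ nb ∉ vq.1 then (PySem.Set.add vq.1 nb, vq.2 ++ [nb]) else vq)
    (visited, qs)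

-- termination helper for pvBfs (cited in decreasing_by): the step appends a block l of
-- fresh cells of cells9 to both visited and the queue
theorem pvStepFold_spec (dirs : List (Int × Int)) (cells9 : List (Int × Int))
    (q : Int × Int) :
    ∀ V qs : List (Int × Int), ∃ l,
      dirs.foldl
        (fun vq d =>
          let nb := (q.1 + d.1, q.2 + d.2)
          if nb ∈ cells9 ∧ nb ∉ vq.1 then (PySem.Set.add vq.1 nb, vq.2 ++ [nb]) else vq)
        (V, qs) = (V ++ l, qs ++ l) ∧ l.Nodup ∧
      (∀ x ∈ l, x ∈ cells9 ∧ x ∉ V ∧ ∃ d ∈ dirs, x = (q.1 + d.1, q.2 + d.2)) ∧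
      (∀ d ∈ dirs, (q.1 + d.1, q.2 + d.2) ∈ cells9 → (q.1 + d.1, q.2 + d.2) ∈ V ++ l) := by
  induction dirs with
  | nil => intro V qs; exact ⟨[], by simp⟩
  | cons d ds ih =>
    intro V qs
    simp only [List.foldl_cons]
    by_cases hc : (q.1 + d.1, q.2 + d.2) ∈ cells9 ∧ (q.1 + d.1, q.2 + d.2) ∉ V
    · rw [if_pos hc, PySem.Set.add_of_not_mem hc.2]
      obtain ⟨l, he, hnd, hmem, hcov⟩ := ih (V ++ [(q.1 + d.1, q.2 + d.2)]) (qs ++ [(q.1 + d.1, q.2 + d.2)])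
      refine ⟨(q.1 + d.1, q.2 + d.2) :: l, ?_, ?_, ?_, ?_⟩
      · simpa [List.append_assoc] using he
      · refine List.nodup_cons.2 ⟨fun hx => ?_, hnd⟩
        exact ((hmem _ hx).2.1) (by simp)
      · intro x hx
        rcases List.mem_cons.1 hx with rfl | hx
        · exact ⟨hc.1, hc.2, d, by simp⟩
        · obtain ⟨h1, h2, d', hd', he'⟩ := hmem x hx
          refine ⟨h1, fun hxV => h2 (by simp [hxV]), d', by simp [hd'], he'⟩
      · intro d' hd' hin
        rcases List.mem_cons.1 hd' with rfl | hd'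
        · simp
        · have := hcov d' hd' hin
          simpa [List.append_assoc] using this
    · rw [if_neg hc]
      obtain ⟨l, he, hnd, hmem, hcov⟩ := ih V qs
      refine ⟨l, he, hnd, ?_, ?_⟩
      · intro x hx
        obtain ⟨h1, h2, d', hd', he'⟩ := hmem x hx
        exact ⟨h1, h2, d', by simp [hd'], he'⟩
      intro d' hd' hin
      rcases List.mem_cons.1 hd' with heq | hd'
      · cases heq
        have hV : (q.1 + d.1, q.2 + d.2) ∈ V := by
          by_contra hnV; exact hc ⟨hin, hnV⟩
        exact List.mem_append.2 (Or.inl hV)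
      · exact hcov d' hd' hin

theorem pvBfsStep_spec (cells9 : List (Int × Int)) (q : Int × Int)
    (V qs : List (Int × Int)) :
    ∃ l, pvBfsStep cells9 q V qs = (V ++ l, qs ++ l) ∧ l.Nodup ∧
      (∀ x ∈ l, x ∈ cells9 ∧ x ∉ V ∧ ∃ d ∈ pvDirs, x = (q.1 + d.1, q.2 + d.2)) ∧
      (∀ d ∈ pvDirs, (q.1 + d.1, q.2 + d.2) ∈ cells9 → (q.1 + d.1, q.2 + d.2) ∈ V ++ l) :=
  pvStepFold_spec pvDirs cells9 q V qs

theorem pvBfs_measure (cells9 V l : List (Int × Int)) (hnd : l.Nodup)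
    (hl : ∀ x ∈ l, x ∈ cells9 ∧ x ∉ V) :
    (cells9.filter (fun x => decide (x ∉ V ++ l))).length + l.length ≤
      (cells9.filter (fun x => decide (x ∉ V))).length := by
  have h1 : ∀ ys : List (Int × Int),
      (ys.filter (fun x => decide (x ∉ V ++ l))).length
        + (ys.filter (fun x => decide (x ∉ V) && decide (x ∈ l))).length
      = (ys.filter (fun x => decide (x ∉ V))).length := by
    intro ys
    induction ys with
    | nil => simp
    | cons x xs ih =>
      by_cases hxV : x ∈ V <;> by_cases hxl : x ∈ l <;>
        simp [hxV, hxl] at ih ⊢ <;> omega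
  have h2 : l.length ≤ (cells9.filter (fun x => decide (x ∉ V) && decide (x ∈ l))).length := by
    have hls : l.toFinset ⊆ (cells9.filter (fun x => decide (x ∉ V) && decide (x ∈ l))).toFinset := by
      intro x hx
      have hxl : x ∈ l := List.mem_toFinset.1 hx
      obtain ⟨h1', h2'⟩ := hl x hxl
      apply List.mem_toFinset.2
      simp only [List.mem_filter]
      exact ⟨h1', by simp [h2', hxl]⟩
    calc l.length = l.toFinset.card := (List.toFinset_card_of_nodup hnd).symm
      _ ≤ _ := Finset.card_le_card hls
      _ ≤ _ := List.toFinset_card_le _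
  have := h1 cells9
  omega

-- A's 'while queue:' loop
def pvBfs (cells9 visited queue : List (Int × Int)) : List (Int × Int) :=
  match queue with
  | [] => visited
  | q :: qs =>
    let vq := pvBfsStep cells9 q visited qs
    pvBfs cells9 vq.1 vq.2
termination_by 2 * (cells9.filter (fun x => decide (x ∉ visited))).length + queue.length
decreasing_by
  obtain ⟨l, he, hnd, hl, -⟩ := pvBfsStep_spec cells9 q visited qs
  have hm := pvBfs_measure cells9 visited l hnd (fun x hx => ⟨(hl x hx).1, (hl x hx).2.1⟩)
  simp only [he]
  simp only [List.length_append, List.length_cons]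
  omega

-- A's component-counting loop over the set cells9 (iteration order = insertion order;
-- the count does not depend on the order)
def pvCountA (cells9 : List (Int × Int)) : Int :=
  (cells9.foldl
    (fun (st : List (Int × Int) × Int) cell =>
      if cell ∈ st.1 then st
      else (pvBfs cells9 (PySem.Set.add st.1 cell) [cell], st.2 + 1))
    ([], 0)).2

def transform (input_grid : List (List Int)) : List (List Int) :=
  let R : Int := input_grid.length
  let C : Int := (PySem.List.pyGetD input_grid 0 []).length
  let bg := pvBg input_grid
  let cells9 : PySem.Set (Int × Int) :=
    (PySem.List.pyRange 0 R 1).foldl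
      (fun s r =>
        (PySem.List.pyRange 0 C 1).foldl
          (fun s c =>
            if PySem.List.pyGetD (PySem.List.pyGetD input_grid r []) c 0 = 9
            then PySem.Set.add s (r, c) else s)
          s)
      PySem.Set.empty
  pvFill bg (pvCountA cells9)

-- ===== PORT B =====

-- find(x): while parent[x] != x: x = parent[x]  — fuel = parent.size (a missing key or
-- exhausted fuel returns x; neither is reached on the calls the program makes, see the proofs)
def pvFind (parent : PySem.Dict (Int × Int) (Int × Int)) :
    Nat → (Int × Int) → (Int × Int)
  | 0, x => x
  | f + 1, x =>
    match parent.get? x with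
    | none => x
    | some p => if p = x then x else pvFind parent f p

-- ra, rb = find((r,c)), find(nb); if ra != rb: parent[ra] = rb
def pvUnion (parent : PySem.Dict (Int × Int) (Int × Int)) (a b : Int × Int) :
    PySem.Dict (Int × Int) (Int × Int) :=
  let ra := pvFind parent parent.size a
  let rb := pvFind parent parent.size b
  if ra ≠ rb then parent.insert ra rb else parent

-- the two union loops of B: build parent = {cell: cell}, then union each cell with its
-- right and down neighbours when present
def pvUF (cells9 : List (Int × Int)) : PySem.Dict (Int × Int) (Int × Int) :=
  cells9.foldl
    (fun p rc =>
      [(rc.1, rc.2 + 1), (rc.1 + 1, rc.2)].foldl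
        (fun p nb => if p.contains nb then pvUnion p rc nb else p)
        p)
    (cells9.foldl (fun p c => p.insert c c) PySem.Dict.empty)

def transform_alt (input_grid : List (List Int)) : List (List Int) :=
  let R : Int := input_grid.length
  let C : Int := (PySem.List.pyGetD input_grid 0 []).length
  let bg := pvBg input_grid
  let cells9 : List (Int × Int) :=
    (PySem.List.pyRange 0 R 1).flatMap
      (fun r =>
        ((PySem.List.pyRange 0 C 1).filter
            (fun c => PySem.List.pyGetD (PySem.List.pyGetD input_grid r []) c 0 == 9)).map
          (fun c => (r, c)))
  let parent := pvUF cells9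
  let num_components : Int :=
    PySem.Set.len (PySem.Set.ofList (cells9.map (fun c => pvFind parent parent.size c)))
  pvFill bg num_components

-- ===== PRECONDITION & SPEC =====
-- Pre_ excludes exactly the inputs on which the Python A raises: the empty grid and a grid
-- whose rows are all empty (IndexError in input_grid[0] / most_common(1)[0]), and a grid
-- with some row shorter than the first row (IndexError in input_grid[r][c]).
def Pre_transform (input_grid : List (List Int)) : Prop :=
  input_grid ≠ [] ∧ input_grid.flatMap (fun r => r) ≠ [] ∧
    ∀ row ∈ input_grid, (input_grid.headD []).length ≤ row.length
instance (input_grid : List (List Int)) : Decidable (Pre_transform input_grid) := by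
  unfold Pre_transform; infer_instance

def pvWitness_transform : List (List Int) := [[9, 1], [1, 9]]

def Spec_transform (input_grid : List (List Int)) (out : List (List Int)) : Prop :=
  out = transform_alt input_grid
instance (input_grid : List (List Int)) (out : List (List Int)) :
    Decidable (Spec_transform input_grid out) := by unfold Spec_transform; infer_instance

-- ===== CLAIM (what is proved, stated in full; the proofs are below) =====
def Claim_equal_transform : Prop :=
  ∀ (input_grid : List (List Int)), Dom_transform input_grid →
    Pre_transform input_grid → Spec_transform input_grid (transform input_grid)

-- ===== LEMMAS AND PROOFS =====

-- ---------- the 4-neighbour graph on a fixed cell list S ----------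

def pvNear (a b : Int × Int) : Prop := ∃ d ∈ pvDirs, b = (a.1 + d.1, a.2 + d.2)

theorem pvNear_symm {a b : Int × Int} (h : pvNear a b) : pvNear b a := by
  obtain ⟨d, hd, rfl⟩ := h
  fin_cases hd
  · exact ⟨(1, 0), by simp [pvDirs], by simp⟩
  · exact ⟨(-1, 0), by simp [pvDirs], by simp⟩
  · exact ⟨(0, 1), by simp [pvDirs], by simp⟩
  · exact ⟨(0, -1), by simp [pvDirs], by simp⟩

def pvRel (S : List (Int × Int)) (a b : Int × Int) : Prop :=
  a ∈ S ∧ b ∈ S ∧ pvNear a b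

theorem pvRel_symm {S : List (Int × Int)} : Symmetric (pvRel S) :=
  fun _ _ h => ⟨h.2.1, h.1, pvNear_symm h.2.2⟩

def pvConn (S : List (Int × Int)) (a b : Int × Int) : Prop :=
  Relation.ReflTransGen (pvRel S) a b

theorem pvConn_symm {S : List (Int × Int)} : Symmetric (pvConn S) :=
  Relation.ReflTransGen.symmetric pvRel_symm

theorem pvConn_mem_right {S : List (Int × Int)} {x y : Int × Int}
    (h : pvConn S x y) (hx : x ∈ S) : y ∈ S := by
  induction h with
  | refl => exact hx
  | tail _ hrel _ => exact hrel.2.1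

theorem pvConn_closed {S : List (Int × Int)} {x y : Int × Int} {W : List (Int × Int)}
    (h : pvConn S x y) (hx : x ∈ W)
    (hcl : ∀ a ∈ W, ∀ b, pvRel S a b → b ∈ W) : y ∈ W := by
  induction h with
  | refl => exact hx
  | tail _ hrel ih => exact hcl _ ih _ hrel

-- ---------- BFS computes the connected component ----------

theorem pvBfs_spec (S : List (Int × Int)) : ∀ V Q : List (Int × Int),
    (∀ v ∈ V, v ∈ S) → (∀ q ∈ Q, q ∈ V) →
    (∀ a ∈ V, a ∈ Q ∨ ∀ b, pvRel S a b → b ∈ V) →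
    (∀ a ∈ V, a ∈ pvBfs S V Q) ∧
    (∀ y ∈ pvBfs S V Q, y ∈ V ∨ ∃ q ∈ Q, pvConn S q y) ∧
    (∀ a ∈ pvBfs S V Q, ∀ b, pvRel S a b → b ∈ pvBfs S V Q) ∧
    (∀ y ∈ pvBfs S V Q, y ∈ S) := by
  intro V Q
  induction V, Q using pvBfs.induct S with
  | case1 V =>
    intro hVS _ hcl
    rw [pvBfs]
    refine ⟨fun a ha => ha, fun y hy => Or.inl hy, fun a ha b hrel => ?_, hVS⟩
    rcases hcl a ha with h | h
    · exact absurd h (List.not_mem_nil)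
    · exact h b hrel
  | case2 V q qs vq ih =>
    intro hVS hQV hcl
    obtain ⟨l, he, hnd, hmem, hcov⟩ := pvBfsStep_spec S q V qs
    have hql : q ∈ V := hQV q (by simp)
    have hqS : q ∈ S := hVS q hql
    have hres : pvBfs S V (q :: qs) = pvBfs S vq.1 vq.2 := by
      rw [pvBfs]
    have hv1 : vq.1 = V ++ l := by rw [show vq = pvBfsStep S q V qs from rfl, he]
    have hv2 : vq.2 = qs ++ l := by rw [show vq = pvBfsStep S q V qs from rfl, he]
    -- hypotheses for the recursive state
    have hVS' : ∀ v ∈ V ++ l, v ∈ S := by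
      intro v hv
      rcases List.mem_append.1 hv with h | h
      · exact hVS v h
      · exact (hmem v h).1
    have hQV' : ∀ x ∈ qs ++ l, x ∈ V ++ l := by
      intro x hx
      rcases List.mem_append.1 hx with h | h
      · exact List.mem_append.2 (Or.inl (hQV x (by simp [h])))
      · exact List.mem_append.2 (Or.inr h)
    have hcl' : ∀ a ∈ V ++ l, a ∈ qs ++ l ∨ ∀ b, pvRel S a b → b ∈ V ++ l := by
      intro a ha
      rcases List.mem_append.1 ha with h | h
      · rcases hcl a h with hq | hclosed
        · rcases List.mem_cons.1 hq with rfl | hq'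
          · refine Or.inr fun b hrel => ?_
            obtain ⟨-, hbS, d, hd, rfl⟩ := hrel
            exact hcov d hd hbS
          · exact Or.inl (List.mem_append.2 (Or.inl hq'))
        · exact Or.inr fun b hrel => List.mem_append.2 (Or.inl (hclosed b hrel))
      · exact Or.inl (List.mem_append.2 (Or.inr h))
    have IH := ih (by rw [hv1]; exact hVS') (by rw [hv1, hv2]; exact hQV')
      (by rw [hv1, hv2]; exact hcl')
    rw [hv1, hv2] at IH
    obtain ⟨IH1, IH2, IH3, IH4⟩ := IH
    rw [hres, hv1, hv2]
    refine ⟨fun a ha => IH1 a (List.mem_append.2 (Or.inl ha)), ?_, IH3, IH4⟩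
    intro y hy
    rcases IH2 y hy with h | ⟨q', hq', hconn⟩
    · rcases List.mem_append.1 h with h | h
      · exact Or.inl h
      · refine Or.inr ⟨q, by simp, ?_⟩
        obtain ⟨hyS, -, d, hd, rfl⟩ := hmem y h
        exact Relation.ReflTransGen.single ⟨hqS, hyS, d, hd, rfl⟩
    · rcases List.mem_append.1 hq' with h | h
      · exact Or.inr ⟨q', by simp [h], hconn⟩
      · refine Or.inr ⟨q, by simp, ?_⟩
        obtain ⟨hq'S, -, d, hd, rfl⟩ := hmem q' h
        exact Relation.ReflTransGen.head ⟨hqS, hq'S, d, hd, rfl⟩ hconn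

-- ---------- A's counting loop counts the Conn-classes, given a class invariant root ----------

theorem pvCountA_aux (S : List (Int × Int)) (root : Int × Int → Int × Int)
    (hiff : ∀ x ∈ S, ∀ y ∈ S, (root x = root y ↔ pvConn S x y)) :
    ∀ (todo done V : List (Int × Int)) (n : Int),
      (∀ x ∈ todo, x ∈ S) → (∀ x ∈ done, x ∈ S) →
      (∀ y, y ∈ V ↔ ∃ x ∈ done, pvConn S x y) →
      n = ((PySem.Set.ofList (done.map root)).length : Int) →
      (todo.foldl
        (fun (st : List (Int × Int) × Int) cell =>
          if cell ∈ st.1 then st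
          else (pvBfs S (PySem.Set.add st.1 cell) [cell], st.2 + 1))
        (V, n)).2 = ((PySem.Set.ofList ((done ++ todo).map root)).length : Int) := by
  intro todo
  induction todo with
  | nil => intro done V n _ _ _ hn; simpa using hn
  | cons c todo ih =>
    intro done V n htodo hdone hV hn
    have hcS : c ∈ S := htodo c (by simp)
    have hVS : ∀ v ∈ V, v ∈ S := by
      intro v hv
      obtain ⟨x, hx, hconn⟩ := (hV v).1 hv
      exact pvConn_mem_right hconn (hdone x hx)
    simp only [List.foldl_cons]
    by_cases hc : c ∈ V
    · rw [if_pos hc]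
      have hstep := ih (done ++ [c]) V n
        (fun x hx => htodo x (by simp [hx]))
        (by intro x hx; rcases List.mem_append.1 hx with h | h
            · exact hdone x h
            · simp at h; subst h; exact hcS)
        (by intro y
            constructor
            · intro hy
              obtain ⟨x, hx, hconn⟩ := (hV y).1 hy
              exact ⟨x, by simp [hx], hconn⟩
            · rintro ⟨x, hx, hconn⟩
              rcases List.mem_append.1 hx with h | h
              · exact (hV y).2 ⟨x, h, hconn⟩
              · simp at h; subst h
                obtain ⟨x0, hx0, hconn0⟩ := (hV x).1 hc
                exact (hV y).2 ⟨x0, hx0, hconn0.trans hconn⟩)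
        (by
          have hrc : root c ∈ done.map root := by
            obtain ⟨x0, hx0, hconn0⟩ := (hV c).1 hc
            exact List.mem_map.2 ⟨x0, hx0, (hiff x0 (hdone x0 hx0) c hcS).2 hconn0⟩
          rw [List.map_append, List.map_singleton, PySem.Set.ofList_append_singleton,
            PySem.Set.add_of_mem (by rw [PySem.Set.mem_ofList]; exact hrc)]
          exact hn)
      simpa [List.append_assoc] using hstep
    · rw [if_neg hc, PySem.Set.add_of_not_mem hc]
      have hcl : ∀ a ∈ V ++ [c], a ∈ [c] ∨ ∀ b, pvRel S a b → b ∈ V ++ [c] := by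
        intro a ha
        rcases List.mem_append.1 ha with h | h
        · refine Or.inr fun b hrel => List.mem_append.2 (Or.inl ?_)
          obtain ⟨x0, hx0, hconn0⟩ := (hV a).1 h
          exact (hV b).2 ⟨x0, hx0, hconn0.tail hrel⟩
        · exact Or.inl h
      obtain ⟨B1, B2, B3, B4⟩ := pvBfs_spec S (V ++ [c]) [c]
        (by intro v hv
            rcases List.mem_append.1 hv with h | h
            · exact hVS v h
            · simp at h; subst h; exact hcS)
        (by intro x hx; simp at hx; subst hx; simp)
        hcl
      have hcin : c ∈ pvBfs S (V ++ [c]) [c] := B1 c (by simp)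
      have hstep := ih (done ++ [c]) (pvBfs S (V ++ [c]) [c]) (n + 1)
        (fun x hx => htodo x (by simp [hx]))
        (by intro x hx; rcases List.mem_append.1 hx with h | h
            · exact hdone x h
            · simp at h; subst h; exact hcS)
        (by intro y
            constructor
            · intro hy
              rcases B2 y hy with h | ⟨q, hq, hconn⟩
              · rcases List.mem_append.1 h with h | h
                · obtain ⟨x, hx, hconn⟩ := (hV y).1 h
                  exact ⟨x, by simp [hx], hconn⟩
                · simp at h; subst h
                  exact ⟨y, by simp, Relation.ReflTransGen.refl⟩
              · rw [List.mem_singleton] at hq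
                rw [hq] at hconn
                exact ⟨c, by simp, hconn⟩
            · rintro ⟨x, hx, hconn⟩
              rcases List.mem_append.1 hx with h | h
              · have : y ∈ V := (hV y).2 ⟨x, h, hconn⟩
                exact B1 y (List.mem_append.2 (Or.inl this))
              · simp at h; subst h
                exact pvConn_closed hconn hcin B3)
        (by
          have hrc : root c ∉ done.map root := by
            intro hmem'
            obtain ⟨x0, hx0, hx0e⟩ := List.mem_map.1 hmem'
            have : pvConn S x0 c := (hiff x0 (hdone x0 hx0) c hcS).1 hx0e
            exact hc ((hV c).2 ⟨x0, hx0, this⟩)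
          rw [List.map_append, List.map_singleton, PySem.Set.ofList_append_singleton,
            PySem.Set.add_of_not_mem (by rw [PySem.Set.mem_ofList]; exact hrc)]
          rw [hn]
          push_cast [List.length_append, List.length_singleton]
          omega)
      simpa [List.append_assoc] using hstep

theorem pvCountA_eq (S : List (Int × Int)) (root : Int × Int → Int × Int)
    (hiff : ∀ x ∈ S, ∀ y ∈ S, (root x = root y ↔ pvConn S x y)) :
    pvCountA S = ((PySem.Set.ofList (S.map root)).length : Int) := by
  have := pvCountA_aux S root hiff S [] [] 0 (fun x hx => hx) (by simp) (by simp) (by simp)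
  simpa [pvCountA] using this

-- ---------- union-find: parent maps, iterated parents, exact depth functions ----------

def pvPar (P : PySem.Dict (Int × Int) (Int × Int)) (x : Int × Int) : Int × Int :=
  (P.get? x).getD x

def pvIter (P : PySem.Dict (Int × Int) (Int × Int)) : Nat → (Int × Int) → (Int × Int)
  | 0, x => x
  | k + 1, x => pvIter P k (pvPar P x)

-- d is the exact distance-to-root along the parent map, for every cell of S
def pvExact (S : List (Int × Int)) (P : PySem.Dict (Int × Int) (Int × Int))
    (d : (Int × Int) → Nat) : Prop :=
  ∀ x ∈ S, pvPar P x ∈ S ∧ (pvPar P x = x → d x = 0) ∧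
    (pvPar P x ≠ x → d x = d (pvPar P x) + 1)

theorem pvIter_succ_right (P : PySem.Dict (Int × Int) (Int × Int)) (k : Nat) :
    ∀ x, pvIter P (k + 1) x = pvPar P (pvIter P k x) := by
  induction k with
  | zero => intro x; rfl
  | succ k ih => intro x; rw [show k + 1 + 1 = (k + 1) + 1 from rfl]
                 show pvIter P (k + 1) (pvPar P x) = _
                 rw [ih (pvPar P x)]; rfl

theorem pvIter_path {S : List (Int × Int)} {P : PySem.Dict (Int × Int) (Int × Int)}
    {d : (Int × Int) → Nat} (hE : pvExact S P d) :
    ∀ (i : Nat) (x : Int × Int), x ∈ S → i ≤ d x →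
      pvIter P i x ∈ S ∧ d (pvIter P i x) = d x - i := by
  intro i
  induction i with
  | zero => intro x hx _; exact ⟨hx, rfl⟩
  | succ i ih =>
    intro x hx hi
    have hpos : 0 < d x := Nat.lt_of_lt_of_le (Nat.succ_pos i) hi
    obtain ⟨hpS, hz, hsucc⟩ := hE x hx
    have hne : pvPar P x ≠ x := fun h => by have := hz h; omega
    have hdp : d x = d (pvPar P x) + 1 := hsucc hne
    have := ih (pvPar P x) hpS (by omega)
    refine ⟨this.1, ?_⟩
    show d (pvIter P i (pvPar P x)) = d x - (i + 1)
    rw [this.2]; omega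

theorem pvIter_root_fix {S : List (Int × Int)} {P : PySem.Dict (Int × Int) (Int × Int)}
    {d : (Int × Int) → Nat} (hE : pvExact S P d) {x : Int × Int} (hx : x ∈ S) :
    pvIter P (d x) x ∈ S ∧ pvPar P (pvIter P (d x) x) = pvIter P (d x) x ∧
      d (pvIter P (d x) x) = 0 := by
  obtain ⟨hS, hd⟩ := pvIter_path hE (d x) x hx le_rfl
  have hd0 : d (pvIter P (d x) x) = 0 := by rw [hd]; omega
  refine ⟨hS, ?_, hd0⟩
  by_contra hne
  have := (hE _ hS).2.2 hne
  omega

theorem pvDepth_lt {S : List (Int × Int)} {P : PySem.Dict (Int × Int) (Int × Int)}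
    {d : (Int × Int) → Nat} (hE : pvExact S P d) {x : Int × Int}
    (hx : x ∈ S) : d x < S.length := by
  have hpath := pvIter_path hE
  set L := (List.range (d x + 1)).map (fun i => pvIter P i x) with hL
  have hlen : L.length = d x + 1 := by simp [hL]
  have hndL : L.Nodup := by
    refine List.Nodup.map_on ?_ (List.nodup_range)
    intro i hi j hj hij
    rw [List.mem_range] at hi hj
    have h1 := (hpath i x hx (by omega)).2
    have h2 := (hpath j x hx (by omega)).2
    rw [hij] at h1
    omega
  have hsub : L.toFinset ⊆ S.toFinset := by
    intro y hy
    obtain ⟨i, hi, rfl⟩ := List.mem_map.1 (List.mem_toFinset.1 hy)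
    rw [List.mem_range] at hi
    exact List.mem_toFinset.2 (hpath i x hx (by omega)).1
  have : L.length ≤ S.length := by
    calc L.length = L.toFinset.card := (List.toFinset_card_of_nodup hndL).symm
      _ ≤ S.toFinset.card := Finset.card_le_card hsub
      _ ≤ S.length := List.toFinset_card_le S
  omega

theorem pvFind_eq_iter {S : List (Int × Int)} {P : PySem.Dict (Int × Int) (Int × Int)}
    {d : (Int × Int) → Nat} (hE : pvExact S P d)
    (hkeys : ∀ y ∈ S, (P.get? y).isSome = true) :
    ∀ (f : Nat) (x : Int × Int), x ∈ S → d x < f → pvFind P f x = pvIter P (d x) x := by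
  intro f
  induction f with
  | zero => intro x _ h; omega
  | succ f ih =>
    intro x hx hf
    obtain ⟨p, hp⟩ := Option.isSome_iff_exists.1 (hkeys x hx)
    have hpar : pvPar P x = p := by simp [pvPar, hp]
    rw [pvFind, hp]
    show (if p = x then x else pvFind P f p) = pvIter P (d x) x
    by_cases hpx : p = x
    · rw [if_pos hpx]
      have : d x = 0 := (hE x hx).2.1 (by rw [hpar, hpx])
      rw [this]; rfl
    · rw [if_neg hpx]
      have hne : pvPar P x ≠ x := by rw [hpar]; exact hpx
      have hdp : d x = d (pvPar P x) + 1 := (hE x hx).2.2 hne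
      have hpS : pvPar P x ∈ S := (hE x hx).1
      have := ih (pvPar P x) hpS (by omega)
      rw [← hpar, this, hdp]
      rfl

-- ---------- generated equivalence relations ----------

def pvSup (T : (Int × Int) → (Int × Int) → Prop) (a b : Int × Int) :
    (Int × Int) → (Int × Int) → Prop :=
  fun x y => T x y ∨ (x = a ∧ y = b)

theorem pvEqvGen_bot {x y : Int × Int} :
    Relation.EqvGen (fun _ _ : Int × Int => False) x y ↔ x = y := by
  constructor
  · intro h
    induction h with
    | rel _ _ h => exact absurd h not_false
    | refl => rfl
    | symm _ _ _ ih => exact ih.symm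
    | trans _ _ _ _ _ ih1 ih2 => exact ih1.trans ih2
  · rintro rfl; exact Relation.EqvGen.refl x

theorem pvEqvGen_sup_iff {T : (Int × Int) → (Int × Int) → Prop} {a b x y : Int × Int} :
    Relation.EqvGen (pvSup T a b) x y ↔
      Relation.EqvGen T x y ∨
        (Relation.EqvGen T x a ∧ Relation.EqvGen T b y) ∨
        (Relation.EqvGen T x b ∧ Relation.EqvGen T a y) := by
  constructor
  · intro h
    induction h with
    | rel u v h =>
      rcases h with h | ⟨rfl, rfl⟩
      · exact Or.inl (Relation.EqvGen.rel _ _ h)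
      · exact Or.inr (Or.inl ⟨Relation.EqvGen.refl _, Relation.EqvGen.refl _⟩)
    | refl => exact Or.inl (Relation.EqvGen.refl _)
    | symm u v _ ih =>
      rcases ih with h | ⟨h1, h2⟩ | ⟨h1, h2⟩
      · exact Or.inl (Relation.EqvGen.symm _ _ h)
      · exact Or.inr (Or.inr ⟨Relation.EqvGen.symm _ _ h2, Relation.EqvGen.symm _ _ h1⟩)
      · exact Or.inr (Or.inl ⟨Relation.EqvGen.symm _ _ h2, Relation.EqvGen.symm _ _ h1⟩)
    | trans u v w _ _ ih1 ih2 =>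
      rcases ih1 with h1 | ⟨h1, h1'⟩ | ⟨h1, h1'⟩ <;>
        rcases ih2 with h2 | ⟨h2, h2'⟩ | ⟨h2, h2'⟩
      · exact Or.inl (Relation.EqvGen.trans _ _ _ h1 h2)
      · exact Or.inr (Or.inl ⟨Relation.EqvGen.trans _ _ _ h1 h2, h2'⟩)
      · exact Or.inr (Or.inr ⟨Relation.EqvGen.trans _ _ _ h1 h2, h2'⟩)
      · exact Or.inr (Or.inl ⟨h1, Relation.EqvGen.trans _ _ _ h1' h2⟩)
      · exact Or.inr (Or.inl ⟨h1, h2'⟩)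
      · exact Or.inl (Relation.EqvGen.trans _ _ _ h1 h2')
      · exact Or.inr (Or.inr ⟨h1, Relation.EqvGen.trans _ _ _ h1' h2⟩)
      · exact Or.inl (Relation.EqvGen.trans _ _ _ h1 h2')
      · exact Or.inr (Or.inr ⟨h1, h2'⟩)
  · intro h
    have hmono : ∀ u v, T u v → pvSup T a b u v := fun _ _ h => Or.inl h
    have hab : Relation.EqvGen (pvSup T a b) a b :=
      Relation.EqvGen.rel _ _ (Or.inr ⟨rfl, rfl⟩)
    rcases h with h | ⟨h1, h2⟩ | ⟨h1, h2⟩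
    · exact Relation.EqvGen.mono hmono h
    · exact Relation.EqvGen.trans _ _ _ (Relation.EqvGen.mono hmono h1)
        (Relation.EqvGen.trans _ _ _ hab (Relation.EqvGen.mono hmono h2))
    · exact Relation.EqvGen.trans _ _ _ (Relation.EqvGen.mono hmono h1)
        (Relation.EqvGen.trans _ _ _ (Relation.EqvGen.symm _ _ hab) (Relation.EqvGen.mono hmono h2))

-- ---------- the root function of a parent map ----------

def pvRoot (P : PySem.Dict (Int × Int) (Int × Int)) (x : Int × Int) : Int × Int :=
  pvFind P P.size x

theorem pvRoot_eq_iter {S : List (Int × Int)} {P : PySem.Dict (Int × Int) (Int × Int)}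
    {d : (Int × Int) → Nat} (hk : P.keys = S) (hE : pvExact S P d) {x : Int × Int}
    (hx : x ∈ S) : pvRoot P x = pvIter P (d x) x := by
  have hkeys : ∀ y ∈ S, (P.get? y).isSome = true := by
    intro y hy
    rw [Option.isSome_iff_ne_none]
    intro hnone
    exact (PySem.Dict.get?_eq_none_iff_not_mem_keys P y).1 hnone (by rw [hk]; exact hy)
  have hsize : P.size = S.length := by
    rw [show P.size = P.keys.length by simp [PySem.Dict.size, PySem.Dict.keys], hk]
  exact pvFind_eq_iter hE hkeys P.size x hx (by rw [hsize]; exact pvDepth_lt hE hx)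

-- ---------- the effect of linking two roots ----------

theorem pvPar_insert (P : PySem.Dict (Int × Int) (Int × Int)) (ra rb x : Int × Int) :
    pvPar (P.insert ra rb) x = if x = ra then rb else pvPar P x := by
  by_cases h : x = ra
  · subst h; simp [pvPar, PySem.Dict.get?_insert_self]
  · simp [pvPar, PySem.Dict.get?_insert, h]

theorem pvLink {S : List (Int × Int)} {P : PySem.Dict (Int × Int) (Int × Int)}
    {d : (Int × Int) → Nat} (hk : P.keys = S) (hE : pvExact S P d)
    {ra rb : Int × Int} (hraS : ra ∈ S) (hrbS : rb ∈ S)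
    (hra : pvPar P ra = ra) (hrb : pvPar P rb = rb) (hne : ra ≠ rb) :
    (P.insert ra rb).keys = S ∧
      ∃ d', pvExact S (P.insert ra rb) d' ∧
        ∀ x ∈ S, pvRoot (P.insert ra rb) x = if pvRoot P x = ra then rb else pvRoot P x := by
  have hdra : d ra = 0 := (hE ra hraS).2.1 hra
  have hdrb : d rb = 0 := (hE rb hrbS).2.1 hrb
  have hkeys' : (P.insert ra rb).keys = S := by
    rw [PySem.Dict.keys_insert_of_contains, hk]
    rw [PySem.Dict.contains_eq_decide_mem_keys, hk]
    simp [hraS]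
  -- path preservation: up to its old root, every parent chain is unchanged
  have hpres : ∀ (i : Nat), ∀ x ∈ S, i ≤ d x → pvIter (P.insert ra rb) i x = pvIter P i x := by
    intro i
    induction i with
    | zero => intro x _ _; rfl
    | succ i ih =>
      intro x hx hi
      have hxra : x ≠ ra := by
        intro h; subst h; omega
      show pvIter (P.insert ra rb) i (pvPar (P.insert ra rb) x) = pvIter P i (pvPar P x)
      rw [pvPar_insert, if_neg hxra]
      have hne' : pvPar P x ≠ x := by
        intro h
        have := (hE x hx).2.1 h
        omega
      have hdp : d x = d (pvPar P x) + 1 := (hE x hx).2.2 hne'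
      exact ih (pvPar P x) (hE x hx).1 (by omega)
  set d' : (Int × Int) → Nat := fun x => if pvIter P (d x) x = ra then d x + 1 else d x with hd'
  have hE' : pvExact S (P.insert ra rb) d' := by
    intro x hx
    by_cases hxra : x = ra
    · rw [hxra]
      rw [pvPar_insert, if_pos rfl]
      refine ⟨hrbS, fun h => absurd h.symm hne, fun _ => ?_⟩
      have h1 : d' ra = 1 := by
        simp only [hd']
        rw [hdra, show pvIter P 0 ra = ra from rfl, if_pos rfl]
      have h2 : d' rb = 0 := by
        simp only [hd']
        rw [hdrb, show pvIter P 0 rb = rb from rfl, if_neg (Ne.symm hne)]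
      rw [h1, h2]
    · rw [pvPar_insert, if_neg hxra]
      obtain ⟨hpS, hz, hsucc⟩ := hE x hx
      by_cases hpx : pvPar P x = x
      · have hdx : d x = 0 := hz hpx
        have hroot : pvIter P (d x) x = x := by rw [hdx]; rfl
        refine ⟨hpS, fun _ => ?_, fun h => absurd hpx h⟩
        rw [hd']; simp only [hroot, hxra, if_false]
        exact hdx
      · have hdx : d x = d (pvPar P x) + 1 := hsucc hpx
        have hsameroot : pvIter P (d (pvPar P x)) (pvPar P x) = pvIter P (d x) x := by
          rw [hdx]; rfl
        refine ⟨hpS, fun h => absurd h hpx, fun _ => ?_⟩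
        rw [hd']; simp only [hsameroot]
        by_cases hr : pvIter P (d x) x = ra <;> simp [hr] <;> omega
  refine ⟨hkeys', d', hE', ?_⟩
  intro x hx
  have hrx := pvRoot_eq_iter hk hE hx
  have hrx' := pvRoot_eq_iter hkeys' hE' hx
  by_cases hr : pvIter P (d x) x = ra
  · rw [if_pos (by rw [hrx]; exact hr)]
    have hdx' : d' x = d x + 1 := by rw [hd']; simp [hr]
    rw [hrx', hdx', pvIter_succ_right, hpres (d x) x hx le_rfl, hr, pvPar_insert, if_pos rfl]
  · rw [if_neg (by rw [hrx]; exact hr)]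
    have hdx' : d' x = d x := by rw [hd']; simp [hr]
    rw [hrx', hdx', hpres (d x) x hx le_rfl, hrx]

-- ---------- the union-find invariant ----------

structure PvInv (S : List (Int × Int)) (P : PySem.Dict (Int × Int) (Int × Int))
    (T : (Int × Int) → (Int × Int) → Prop) : Prop where
  keys : P.keys = S
  exact : ∃ d, pvExact S P d
  conn : ∀ x ∈ S, pvRoot P x ∈ S ∧ Relation.EqvGen T x (pvRoot P x)
  riff : ∀ x ∈ S, ∀ y ∈ S, (pvRoot P x = pvRoot P y ↔ Relation.EqvGen T x y)
  sub : ∀ u v, T u v → pvRel S u v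

theorem pvIte_iff {u v ra rb : Int × Int} (_h : ra ≠ rb) :
    ((if u = ra then rb else u) = if v = ra then rb else v) ↔
      (u = v ∨ (u = ra ∧ v = rb) ∨ (u = rb ∧ v = ra)) := by
  by_cases h1 : u = ra <;> by_cases h2 : v = ra <;> (simp [h1, h2]; try tauto)

theorem pvUnion_inv {S : List (Int × Int)} {P : PySem.Dict (Int × Int) (Int × Int)}
    {T : (Int × Int) → (Int × Int) → Prop} (inv : PvInv S P T) {a b : Int × Int}
    (haS : a ∈ S) (hbS : b ∈ S) (hnear : pvNear a b) :
    PvInv S (pvUnion P a b) (pvSup T a b) := by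
  have hrelab : pvRel S a b := ⟨haS, hbS, hnear⟩
  have hsub' : ∀ u v, pvSup T a b u v → pvRel S u v := by
    rintro u v (h | ⟨rfl, rfl⟩)
    · exact inv.sub _ _ h
    · exact hrelab
  have hmono : ∀ u v, T u v → pvSup T a b u v := fun _ _ h => Or.inl h
  show PvInv S
    (if pvRoot P a ≠ pvRoot P b then P.insert (pvRoot P a) (pvRoot P b) else P) (pvSup T a b)
  by_cases hne : pvRoot P a = pvRoot P b
  · rw [if_neg (by simp [hne])]
    have hab : Relation.EqvGen T a b := (inv.riff a haS b hbS).1 hne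
    refine ⟨inv.keys, inv.exact, ?_, ?_, hsub'⟩
    · exact fun x hx => ⟨(inv.conn x hx).1, Relation.EqvGen.mono hmono (inv.conn x hx).2⟩
    · intro x hx y hy
      rw [pvEqvGen_sup_iff]
      constructor
      · intro h; exact Or.inl ((inv.riff x hx y hy).1 h)
      · rintro (h | ⟨h1, h2⟩ | ⟨h1, h2⟩)
        · exact (inv.riff x hx y hy).2 h
        · exact (inv.riff x hx y hy).2
            (Relation.EqvGen.trans _ _ _ h1 (Relation.EqvGen.trans _ _ _ hab h2))
        · exact (inv.riff x hx y hy).2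
            (Relation.EqvGen.trans _ _ _ h1
              (Relation.EqvGen.trans _ _ _ (Relation.EqvGen.symm _ _ hab) h2))
  · rw [if_pos hne]
    obtain ⟨d, hE⟩ := inv.exact
    have hxa := pvRoot_eq_iter inv.keys hE haS
    have hxb := pvRoot_eq_iter inv.keys hE hbS
    obtain ⟨hraS, hrapar, -⟩ := pvIter_root_fix hE haS
    obtain ⟨hrbS, hrbpar, -⟩ := pvIter_root_fix hE hbS
    rw [← hxa] at hraS hrapar
    rw [← hxb] at hrbS hrbpar
    obtain ⟨hkeys', d', hE', hroot'⟩ := pvLink inv.keys hE hraS hrbS hrapar hrbpar hne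
    have hconnra : Relation.EqvGen (pvSup T a b) a (pvRoot P a) :=
      Relation.EqvGen.mono hmono (inv.conn a haS).2
    have hconnrb : Relation.EqvGen (pvSup T a b) b (pvRoot P b) :=
      Relation.EqvGen.mono hmono (inv.conn b hbS).2
    have hab' : Relation.EqvGen (pvSup T a b) a b := Relation.EqvGen.rel _ _ (Or.inr ⟨rfl, rfl⟩)
    have hrarb : Relation.EqvGen (pvSup T a b) (pvRoot P a) (pvRoot P b) :=
      Relation.EqvGen.trans _ _ _ (Relation.EqvGen.symm _ _ hconnra)
        (Relation.EqvGen.trans _ _ _ hab' hconnrb)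
    refine ⟨hkeys', ⟨d', hE'⟩, ?_, ?_, hsub'⟩
    · intro x hx
      rw [hroot' x hx]
      by_cases hc : pvRoot P x = pvRoot P a
      · rw [if_pos hc]
        refine ⟨hrbS, ?_⟩
        have h1 : Relation.EqvGen (pvSup T a b) x (pvRoot P a) := by
          rw [← hc]; exact Relation.EqvGen.mono hmono (inv.conn x hx).2
        exact Relation.EqvGen.trans _ _ _ h1 hrarb
      · rw [if_neg hc]
        exact ⟨(inv.conn x hx).1, Relation.EqvGen.mono hmono (inv.conn x hx).2⟩
    · intro x hx y hy
      rw [hroot' x hx, hroot' y hy, pvIte_iff hne, pvEqvGen_sup_iff]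
      have e1 : (pvRoot P x = pvRoot P y) ↔ Relation.EqvGen T x y := inv.riff x hx y hy
      have e2 : (pvRoot P x = pvRoot P a) ↔ Relation.EqvGen T x a := inv.riff x hx a haS
      have e3 : (pvRoot P y = pvRoot P b) ↔ Relation.EqvGen T y b := inv.riff y hy b hbS
      have e4 : (pvRoot P x = pvRoot P b) ↔ Relation.EqvGen T x b := inv.riff x hx b hbS
      have e5 : (pvRoot P y = pvRoot P a) ↔ Relation.EqvGen T y a := inv.riff y hy a haS
      constructor
      · rintro (h | ⟨h1, h2⟩ | ⟨h1, h2⟩)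
        · exact Or.inl (e1.1 h)
        · exact Or.inr (Or.inl ⟨e2.1 h1, Relation.EqvGen.symm _ _ (e3.1 h2)⟩)
        · exact Or.inr (Or.inr ⟨e4.1 h1, Relation.EqvGen.symm _ _ (e5.1 h2)⟩)
      · rintro (h | ⟨h1, h2⟩ | ⟨h1, h2⟩)
        · exact Or.inl (e1.2 h)
        · exact Or.inr (Or.inl ⟨e2.2 h1, e3.2 (Relation.EqvGen.symm _ _ h2)⟩)
        · exact Or.inr (Or.inr ⟨e4.2 h1, e5.2 (Relation.EqvGen.symm _ _ h2)⟩)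

-- one neighbour candidate of the inner 'for nb in (...)' loop
theorem pvCand_inv {S : List (Int × Int)} {P : PySem.Dict (Int × Int) (Int × Int)}
    {T : (Int × Int) → (Int × Int) → Prop} (inv : PvInv S P T) {rc nb : Int × Int}
    (hrcS : rc ∈ S) (hnear : pvNear rc nb) :
    ∃ T', PvInv S (if P.contains nb then pvUnion P rc nb else P) T' ∧
      (∀ u v, T u v → T' u v) ∧ (nb ∈ S → T' rc nb) := by
  by_cases hc : nb ∈ S
  · have hcon : P.contains nb = true := by
      rw [PySem.Dict.contains_eq_decide_mem_keys, inv.keys]; simp [hc]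
    rw [hcon]
    exact ⟨pvSup T rc nb, by simpa using pvUnion_inv inv hrcS hc hnear,
      fun _ _ h => Or.inl h, fun _ => Or.inr ⟨rfl, rfl⟩⟩
  · have hcon : P.contains nb = false := by
      rw [PySem.Dict.contains_eq_decide_mem_keys, inv.keys]; simp [hc]
    rw [hcon]
    exact ⟨T, by simpa using inv, fun _ _ h => h, fun h => absurd h hc⟩

theorem pvNear_right (rc : Int × Int) : pvNear rc (rc.1, rc.2 + 1) :=
  ⟨(0, 1), by simp [pvDirs], by simp⟩

theorem pvNear_down (rc : Int × Int) : pvNear rc (rc.1 + 1, rc.2) :=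
  ⟨(1, 0), by simp [pvDirs], by simp⟩

theorem pvUF_loop {S : List (Int × Int)} :
    ∀ (todo : List (Int × Int)) (P : PySem.Dict (Int × Int) (Int × Int))
      (T : (Int × Int) → (Int × Int) → Prop), (∀ x ∈ todo, x ∈ S) → PvInv S P T →
    ∃ T', PvInv S
        (todo.foldl
          (fun p rc =>
            [(rc.1, rc.2 + 1), (rc.1 + 1, rc.2)].foldl
              (fun p nb => if p.contains nb then pvUnion p rc nb else p) p)
          P) T' ∧
      (∀ u v, T u v → T' u v) ∧
      (∀ rc ∈ todo, ∀ nbv ∈ [(rc.1, rc.2 + 1), (rc.1 + 1, rc.2)], nbv ∈ S → T' rc nbv) := by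
  intro todo
  induction todo with
  | nil =>
    intro P T _ inv
    exact ⟨T, inv, fun _ _ h => h, by simp⟩
  | cons rc todo ih =>
    intro P T htodo inv
    have hrcS : rc ∈ S := htodo rc (by simp)
    simp only [List.foldl_cons, List.foldl_nil]
    obtain ⟨T1, inv1, hm1, hc1⟩ := pvCand_inv inv hrcS (pvNear_right rc)
    obtain ⟨T2, inv2, hm2, hc2⟩ := pvCand_inv inv1 hrcS (pvNear_down rc)
    obtain ⟨T', inv', hm', hcov⟩ := ih _ _ (fun x hx => htodo x (by simp [hx])) inv2
    refine ⟨T', inv', fun u v h => hm' _ _ (hm2 _ _ (hm1 _ _ h)), ?_⟩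
    intro rc' hrc' nbv hnbv hnbvS
    rcases List.mem_cons.1 hrc' with heq | hrc'
    · cases heq
      rcases List.mem_cons.1 hnbv with heq' | hnbv'
      · cases heq'
        exact hm' _ _ (hm2 _ _ (hc1 hnbvS))
      · rw [List.mem_singleton] at hnbv'
        cases hnbv'
        exact hm' _ _ (hc2 hnbvS)
    · exact hcov rc' hrc' nbv hnbv hnbvS

-- ---------- the initial parent map {cell: cell} ----------

theorem pvInit_get? (S : List (Int × Int)) :
    ∀ (P : PySem.Dict (Int × Int) (Int × Int)) (x : Int × Int),
      (S.foldl (fun p c => p.insert c c) P).get? x = if x ∈ S then some x else P.get? x := by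
  induction S with
  | nil => intro P x; simp
  | cons c S ih =>
    intro P x
    rw [List.foldl_cons, ih]
    by_cases hx : x ∈ S
    · simp [hx]
    · by_cases hxc : x = c <;> simp [hx, hxc, PySem.Dict.get?_insert]

theorem pvInit_inv (S : List (Int × Int)) (hnd : S.Nodup) :
    PvInv S (S.foldl (fun p c => p.insert c c) PySem.Dict.empty) (fun _ _ => False) := by
  set P0 := S.foldl (fun p c => p.insert c c) PySem.Dict.empty with hP0
  have hkeys : P0.keys = S := by
    rw [hP0, PySem.Dict.keys_foldl_insert S (fun _ x => x) PySem.Dict.empty,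
      PySem.Dict.keys_empty, PySem.Set.update_nil_left, PySem.Set.ofList_eq_self_of_nodup S hnd]
  have hget : ∀ x ∈ S, P0.get? x = some x := by
    intro x hx; rw [hP0, pvInit_get? S PySem.Dict.empty x, if_pos hx]
  have hpar : ∀ x ∈ S, pvPar P0 x = x := by
    intro x hx; rw [pvPar, hget x hx]; rfl
  have hE : pvExact S P0 (fun _ => 0) := by
    intro x hx
    refine ⟨by rw [hpar x hx]; exact hx, fun _ => rfl, fun h => absurd (hpar x hx) h⟩
  have hroot : ∀ x ∈ S, pvRoot P0 x = x := by
    intro x hx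
    rw [pvRoot_eq_iter hkeys hE hx]
    rfl
  refine ⟨hkeys, ⟨_, hE⟩, ?_, ?_, fun _ _ h => absurd h not_false⟩
  · intro x hx
    rw [hroot x hx]
    exact ⟨hx, Relation.EqvGen.refl x⟩
  · intro x hx y hy
    rw [hroot x hx, hroot y hy, pvEqvGen_bot]

-- ---------- the final roots decide 4-connectivity ----------

theorem pvUF_root_iff (S : List (Int × Int)) (hnd : S.Nodup) :
    ∀ x ∈ S, ∀ y ∈ S,
      (pvFind (pvUF S) (pvUF S).size x = pvFind (pvUF S) (pvUF S).size y ↔ pvConn S x y) := by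
  obtain ⟨T', inv', -, hcov⟩ :=
    pvUF_loop S (S.foldl (fun p c => p.insert c c) PySem.Dict.empty)
      (fun _ _ => False) (fun _ hx => hx) (pvInit_inv S hnd)
  have hfwd : ∀ u v, Relation.EqvGen T' u v → pvConn S u v := by
    intro u v h
    induction h with
    | rel u v h => exact Relation.ReflTransGen.single (inv'.sub u v h)
    | refl => exact Relation.ReflTransGen.refl
    | symm u v _ ih => exact pvConn_symm ih
    | trans u v w _ _ ih1 ih2 => exact ih1.trans ih2
  have hone : ∀ u v, pvRel S u v → Relation.EqvGen T' u v := by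
    intro u v hrel
    obtain ⟨huS, hvS, dd, hdd, hv⟩ := hrel
    fin_cases hdd
    · -- d = (-1, 0): v = (u.1 - 1, u.2), so u is v's down neighbour
      have hu : u = (v.1 + 1, v.2) := by
        subst hv
        exact Prod.ext (by simp; try omega) (by simp; try omega)
      refine Relation.EqvGen.symm _ _ (Relation.EqvGen.rel _ _ ?_)
      rw [hu]
      exact hcov v hvS (v.1 + 1, v.2) (by simp) (hu ▸ huS)
    · -- d = (1, 0): v is u's down neighbour
      have hv' : v = (u.1 + 1, u.2) := by
        subst hv
        exact Prod.ext (by simp; try omega) (by simp; try omega)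
      refine Relation.EqvGen.rel _ _ ?_
      rw [hv']
      exact hcov u huS (u.1 + 1, u.2) (by simp) (hv' ▸ hvS)
    · -- d = (0, -1): u is v's right neighbour
      have hu : u = (v.1, v.2 + 1) := by
        subst hv
        exact Prod.ext (by simp; try omega) (by simp; try omega)
      refine Relation.EqvGen.symm _ _ (Relation.EqvGen.rel _ _ ?_)
      rw [hu]
      exact hcov v hvS (v.1, v.2 + 1) (by simp) (hu ▸ huS)
    · -- d = (0, 1): v is u's right neighbour
      have hv' : v = (u.1, u.2 + 1) := by
        subst hv
        exact Prod.ext (by simp; try omega) (by simp; try omega)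
      refine Relation.EqvGen.rel _ _ ?_
      rw [hv']
      exact hcov u huS (u.1, u.2 + 1) (by simp) (hv' ▸ hvS)
  have hbwd : ∀ u v, pvConn S u v → Relation.EqvGen T' u v := by
    intro u v h
    induction h with
    | refl => exact Relation.EqvGen.refl _
    | tail _ hrel ih => exact Relation.EqvGen.trans _ _ _ ih (hone _ _ hrel)
  intro x hx y hy
  have h := inv'.riff x hx y hy
  exact ⟨fun he => hfwd x y (h.1 he), fun hc => h.2 (hbwd x y hc)⟩

-- ---------- A's cell set and B's cell list are the same list ----------

theorem pvGuardFold (l : List Int) (v : Int → Int) (r : Int) :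
    ∀ s : PySem.Set (Int × Int),
      l.foldl (fun s c => if v c = 9 then PySem.Set.add s (r, c) else s) s
        = ((l.filter (fun c => v c == 9)).map (fun c => (r, c))).foldl PySem.Set.add s := by
  induction l with
  | nil => intro s; rfl
  | cons c l ih =>
    intro s
    by_cases h : v c = 9 <;> simp [List.foldl_cons, h, ih]

theorem pvFoldAdd (rows : List Int) (F : Int → List (Int × Int)) :
    ∀ s : PySem.Set (Int × Int),
      rows.foldl (fun s r => (F r).foldl PySem.Set.add s) s
        = (rows.flatMap F).foldl PySem.Set.add s := by
  induction rows with
  | nil => intro s; rfl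
  | cons r rows ih =>
    intro s
    rw [List.foldl_cons, ih, List.flatMap_cons, List.foldl_append]

theorem pvFlatMap_nodup (rows : List Int) (F : Int → List (Int × Int))
    (hnd : rows.Nodup) (hF : ∀ r, (F r).Nodup) (hfst : ∀ r x, x ∈ F r → x.1 = r) :
    (rows.flatMap F).Nodup := by
  induction rows with
  | nil => simp
  | cons r rows ih =>
    rw [List.flatMap_cons]
    refine List.Nodup.append (hF r) (ih (List.nodup_cons.1 hnd).2) ?_
    intro x hx1 hx2
    obtain ⟨r', hr', hx'⟩ := List.mem_flatMap.1 hx2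
    have h1 : x.1 = r := hfst r x hx1
    have h2 : x.1 = r' := hfst r' x hx'
    have hrr : r = r' := by rw [← h1, h2]
    subst hrr
    exact (List.nodup_cons.1 hnd).1 hr'

def pvCellsB (input_grid : List (List Int)) : List (Int × Int) :=
  (PySem.List.pyRange 0 (input_grid.length : Int) 1).flatMap
    (fun r =>
      ((PySem.List.pyRange 0 ((PySem.List.pyGetD input_grid 0 []).length : Int) 1).filter
          (fun c => PySem.List.pyGetD (PySem.List.pyGetD input_grid r []) c 0 == 9)).map
        (fun c => (r, c)))

theorem pvCellsB_nodup (input_grid : List (List Int)) : (pvCellsB input_grid).Nodup := by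
  refine pvFlatMap_nodup _ _ (PySem.List.nodup_pyRange_one _ _) ?_ ?_
  · intro r
    refine List.Nodup.map ?_ (List.Nodup.filter _ (PySem.List.nodup_pyRange_one _ _))
    intro a b hab
    simpa using hab
  · intro r x hx
    obtain ⟨c, -, rfl⟩ := List.mem_map.1 hx
    rfl

theorem pvCellsA_eq (input_grid : List (List Int)) :
    (PySem.List.pyRange 0 (input_grid.length : Int) 1).foldl
      (fun s r =>
        (PySem.List.pyRange 0 ((PySem.List.pyGetD input_grid 0 []).length : Int) 1).foldl
          (fun s c =>
            if PySem.List.pyGetD (PySem.List.pyGetD input_grid r []) c 0 = 9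
            then PySem.Set.add s (r, c) else s)
          s)
      PySem.Set.empty = pvCellsB input_grid := by
  have h1 : ∀ r s, (PySem.List.pyRange 0 ((PySem.List.pyGetD input_grid 0 []).length : Int) 1).foldl
      (fun s c =>
        if PySem.List.pyGetD (PySem.List.pyGetD input_grid r []) c 0 = 9
        then PySem.Set.add s (r, c) else s) s
      = (((PySem.List.pyRange 0 ((PySem.List.pyGetD input_grid 0 []).length : Int) 1).filter
            (fun c => PySem.List.pyGetD (PySem.List.pyGetD input_grid r []) c 0 == 9)).map
          (fun c => (r, c))).foldl PySem.Set.add s :=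
    fun r s => pvGuardFold _ _ r s
  calc _ = (pvCellsB input_grid).foldl PySem.Set.add PySem.Set.empty := by
        have h2 : (fun (s : PySem.Set (Int × Int)) (r : Int) =>
            (PySem.List.pyRange 0 ((PySem.List.pyGetD input_grid 0 []).length : Int) 1).foldl
              (fun s c =>
                if PySem.List.pyGetD (PySem.List.pyGetD input_grid r []) c 0 = 9
                then PySem.Set.add s (r, c) else s) s)
            = fun (s : PySem.Set (Int × Int)) (r : Int) =>
              (((PySem.List.pyRange 0 ((PySem.List.pyGetD input_grid 0 []).length : Int) 1).filter
                  (fun c => PySem.List.pyGetD (PySem.List.pyGetD input_grid r []) c 0 == 9)).map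
                (fun c => (r, c))).foldl PySem.Set.add s := by
          funext s r
          exact h1 r s
        rw [h2]
        exact pvFoldAdd _ _ PySem.Set.empty
    _ = PySem.Set.ofList (pvCellsB input_grid) := (PySem.Set.ofList_eq_foldl _).symm
    _ = pvCellsB input_grid := PySem.Set.ofList_eq_self_of_nodup _ (pvCellsB_nodup input_grid)

-- ---------- the two transforms agree ----------

theorem pvTransform_eq (input_grid : List (List Int)) :
    transform input_grid = transform_alt input_grid := by
  have hkey : pvCountA (pvCellsB input_grid)
      = PySem.Set.len (PySem.Set.ofList ((pvCellsB input_grid).map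
          (fun c => pvFind (pvUF (pvCellsB input_grid)) (pvUF (pvCellsB input_grid)).size c))) := by
    rw [pvCountA_eq (pvCellsB input_grid)
      (fun c => pvFind (pvUF (pvCellsB input_grid)) (pvUF (pvCellsB input_grid)).size c)
      (pvUF_root_iff (pvCellsB input_grid) (pvCellsB_nodup input_grid))]
    rfl
  show pvFill (pvBg input_grid) (pvCountA _) = pvFill (pvBg input_grid) _
  rw [pvCellsA_eq input_grid]
  rw [hkey]
  rfl

-- ===== VERDICT (by name: the statement is the Claim_ definition above) =====
theorem transform_spec : Claim_equal_transform := by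
  intro input_grid _ _
  unfold Spec_transform
  exact pvTransform_eq input_grid
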